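-- pv_equiv track=rewrite | github.com/adjudan97onely-cyber/Darknexus | analytics/backend/services/keno_engine.py | _delay
-- ===== SOURCE A (Python) =====
-- from typing import List, Dict, Tuple
--
-- POOL_SIZE        = 70    # Numéros de 1 à 70
--
-- def _delay(draws: List[List[int]]) -> Dict[int, int]:
--     """Retard actuel de chaque numéro (nombre de tirages depuis dernière apparition)."""
--     last_seen = {}
--     for i, draw in enumerate(draws):
--         for n in draw:
--             last_seen[n] = i
--     n_draws = len(draws)
--     return {n: (n_draws - 1 - last_seen[n]) if n in last_seen else n_draws
--             for n in range(1, POOL_SIZE + 1)}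
-- ===== SOURCE B (Python) =====
-- POOL_SIZE = 70
--
-- def _delay(draws):
--     """Per-number reverse scan: the delay of n is the index of the first reversed
--     draw containing n, or len(draws) if n never appeared."""
--     n_draws = len(draws)
--     return {n: next((j for j, draw in enumerate(reversed(draws)) if n in draw), n_draws)
--             for n in range(1, POOL_SIZE + 1)}
-- ===== Notes on version B (the rewrite author's own statement) =====
-- stated objective: simpler
-- what changed: Replaced the forward pass that builds a last_seen index dict (then subtracts it from n_draws-1) by a direct per-number search: each number's delay is the index of the first reversed draw containing it, with no auxiliary table or subtraction.
import Mathlib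
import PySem

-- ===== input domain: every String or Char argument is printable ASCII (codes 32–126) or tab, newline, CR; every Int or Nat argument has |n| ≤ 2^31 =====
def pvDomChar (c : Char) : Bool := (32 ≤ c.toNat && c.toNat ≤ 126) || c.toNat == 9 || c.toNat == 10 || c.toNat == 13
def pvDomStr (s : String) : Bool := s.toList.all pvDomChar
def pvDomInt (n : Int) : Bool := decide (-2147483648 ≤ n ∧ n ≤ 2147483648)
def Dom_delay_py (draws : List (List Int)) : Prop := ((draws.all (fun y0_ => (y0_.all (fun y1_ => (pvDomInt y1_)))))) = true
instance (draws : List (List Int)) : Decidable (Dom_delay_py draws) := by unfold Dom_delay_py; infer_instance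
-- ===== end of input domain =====

-- B replaces A's last_seen index dict (built forward, then n_draws-1-last_seen[n]) by a
-- direct per-number search over the reversed draws; objective: simpler.

-- ===== PORT A =====
-- last_seen = {}; for i, draw in enumerate(draws): for n in draw: last_seen[n] = i
def pvLastSeen (draws : List (List Int)) : PySem.Dict Int Int :=
  (PySem.List.enumerate draws).foldl
    (fun d p => p.2.foldl (fun d n => d.insert n p.1) d) PySem.Dict.empty

def delay_py (draws : List (List Int)) : List (Int × Int) :=
  let last_seen := pvLastSeen draws
  let n_draws : Int := draws.length
  (PySem.List.pyRange 1 (70 + 1) 1).map (fun n =>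
    (n, match last_seen.get? n with
        | some i => n_draws - 1 - i
        | none   => n_draws))

-- ===== PORT B =====
-- next((j for j, draw in enumerate(reversed(draws)) if n in draw), n_draws)
def delay_py_alt (draws : List (List Int)) : List (Int × Int) :=
  let n_draws : Int := draws.length
  (PySem.List.pyRange 1 (70 + 1) 1).map (fun n =>
    (n, match draws.reverse.findIdx? (fun d => d.contains n) with
        | some j => (j : Int)
        | none   => n_draws))

-- ===== PRECONDITION & SPEC =====
def Spec_delay_py (draws : List (List Int)) (out : List (Int × Int)) : Prop := out = delay_py_alt draws
instance (draws : List (List Int)) (out : List (Int × Int)) : Decidable (Spec_delay_py draws out) := by unfold Spec_delay_py; infer_instance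

-- ===== CLAIM (what is proved, stated in full; the proofs are below) =====
def Claim_equal_delay_py : Prop := ∀ (draws : List (List Int)), Dom_delay_py draws → Spec_delay_py draws (delay_py draws)

-- ===== LEMMAS AND PROOFS =====

-- folding constant-valued inserts: lookup is the constant iff the key occurred
theorem pv_get?_foldl_insert_const (l : List Int) (d : PySem.Dict Int Int) (v m : Int) :
    ((l.foldl (fun d n => d.insert n v) d).get? m) = if m ∈ l then some v else d.get? m := by
  induction l generalizing d with
  | nil => simp
  | cons a l ih =>
      simp only [List.foldl_cons, ih, List.mem_cons]
      by_cases hl : m ∈ l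
      · simp [hl]
      · by_cases ha : m = a
        · simp [ha, PySem.Dict.get?_insert_self]
        · simp [ha, hl, PySem.Dict.get?_insert_of_ne _ _ ha]

theorem pv_lastSeen_append (ds : List (List Int)) (d : List Int) :
    pvLastSeen (ds ++ [d]) = d.foldl (fun dc n => dc.insert n (ds.length : Int)) (pvLastSeen ds) := by
  simp [pvLastSeen, PySem.List.enumerate_append, List.foldl_append]

-- the heart: A's (n_draws - 1 - last_seen[n]) is B's first index in the reversed draws
theorem pv_key (ds : List (List Int)) (n : Int) :
    ((pvLastSeen ds).get? n).map (fun i => (ds.length : Int) - 1 - i)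
      = (ds.reverse.findIdx? (fun d => d.contains n)).map (fun j => (j : Int)) := by
  induction ds using List.reverseRecOn with
  | nil => simp [pvLastSeen]
  | append_singleton ds d ih =>
      rw [pv_lastSeen_append]
      have hrev : (ds ++ [d]).reverse = d :: ds.reverse := by simp
      rw [hrev, List.findIdx?_cons]
      by_cases hmem : n ∈ d
      · simp [pv_get?_foldl_insert_const, hmem]
      · have hc : d.contains n = false := by simp [hmem]
        rw [pv_get?_foldl_insert_const]
        simp only [hmem, if_false, hc, Bool.false_eq_true, if_false]
        cases hg : (pvLastSeen ds).get? n with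
        | none =>
            rw [hg] at ih
            cases hf : ds.reverse.findIdx? (fun d => d.contains n) with
            | none => simp
            | some j => rw [hf] at ih; simp at ih
        | some i =>
            rw [hg] at ih
            cases hf : ds.reverse.findIdx? (fun d => d.contains n) with
            | none => rw [hf] at ih; simp at ih
            | some j =>
                rw [hf] at ih
                simp at ih ⊢
                omega

-- ===== VERDICT (by name: the statement is the Claim_ definition above) =====
theorem delay_py_spec : Claim_equal_delay_py := by
  intro draws _
  unfold Spec_delay_py delay_py delay_py_alt
  apply List.map_congr_left
  intro n _
  have h := pv_key draws n
  cases hg : (pvLastSeen draws).get? n with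
  | none =>
      rw [hg] at h
      cases hf : draws.reverse.findIdx? (fun d => d.contains n) with
      | none => simp
      | some j => rw [hf] at h; simp at h
  | some i =>
      rw [hg] at h
      cases hf : draws.reverse.findIdx? (fun d => d.contains n) with
      | none => rw [hf] at h; simp at h
      | some j =>
          rw [hf] at h
          simp at h
          simp [h]
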